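-- pv_equiv track=rewrite | github.com/SeanCarlson96/PodClipBot-backend | diarized_subtitles2.py | assign_speaker
-- ===== SOURCE A (Python) =====
-- def assign_speaker(words):
--     last_speaker = None
--
--     # First pass: from start to end
--     for word in words:
--         if "speaker" in word:
--             last_speaker = word["speaker"]
--         elif last_speaker is not None:
--             word["speaker"] = last_speaker
--
--     # Second pass: from end to start
--     last_speaker = None
--     for word in reversed(words):
--         if "speaker" in word:
--             last_speaker = word["speaker"]
--         elif last_speaker is not None:
--             word["speaker"] = last_speaker
--
--     return words
-- ===== SOURCE B (Python) =====
-- def assign_speaker(words):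
--     # One pass: seed last_speaker with the first speaker value found anywhere,
--     # which reproduces the backward backfill of the leading words.
--     last_speaker = next((w["speaker"] for w in words if "speaker" in w), None)
--     for word in words:
--         if "speaker" in word:
--             last_speaker = word["speaker"]
--         elif last_speaker is not None:
--             word["speaker"] = last_speaker
--     return words
-- ===== Notes on version B (the rewrite author's own statement) =====
-- stated objective: simpler
-- what changed: Replaced the forward-then-backward two-pass fill with a single forward pass whose last_speaker is seeded with the first speaker value found in the list, which reproduces the backfill of the leading words.
import Mathlib
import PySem

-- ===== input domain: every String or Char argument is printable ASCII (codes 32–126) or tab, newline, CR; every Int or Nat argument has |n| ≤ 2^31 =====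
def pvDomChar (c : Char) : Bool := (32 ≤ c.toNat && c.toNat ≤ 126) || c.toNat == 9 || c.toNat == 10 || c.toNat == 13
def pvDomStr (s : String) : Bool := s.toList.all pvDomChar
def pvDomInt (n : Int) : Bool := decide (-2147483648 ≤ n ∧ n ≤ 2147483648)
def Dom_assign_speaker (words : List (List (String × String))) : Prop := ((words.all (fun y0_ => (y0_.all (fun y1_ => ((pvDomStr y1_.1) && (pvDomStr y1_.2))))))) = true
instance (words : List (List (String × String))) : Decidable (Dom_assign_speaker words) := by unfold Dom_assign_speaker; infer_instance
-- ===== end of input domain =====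

-- B replaces A's forward-then-backward two-pass fill by one forward pass seeded with the
-- first speaker value in the list (simpler decomposition). Both A and B mutate the word
-- dicts in place in Python, in the same way; the proved equivalence is about the returned list.

-- ===== PORT A =====
-- '"speaker" in word' / 'word["speaker"]': first matching key of the association list.
def pvGetSpk : List (String × String) → Option String
  | [] => none
  | (k, v) :: r => if k == "speaker" then some v else pvGetSpk r

-- one 'for' loop of A (both passes have identical bodies); 'word["speaker"] = s' on a
-- word without the key appends the pair (exact: the key is absent in that branch).
def pvPassA (ls : Option String) : List (List (String × String)) → List (List (String × String))
  | [] => []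
  | w :: rest =>
    match pvGetSpk w with
    | some v => w :: pvPassA (some v) rest
    | none =>
      match ls with
      | some s => (w ++ [("speaker", s)]) :: pvPassA (some s) rest
      | none => w :: pvPassA none rest

def assign_speaker (words : List (List (String × String))) : List (List (String × String)) :=
  (pvPassA none ((pvPassA none words).reverse)).reverse

-- ===== PORT B =====
-- next((w["speaker"] for w in words if "speaker" in w), None)
def pvFirstSpk : List (List (String × String)) → Option String
  | [] => none
  | w :: rest =>
    match pvGetSpk w with
    | some v => some v
    | none => pvFirstSpk rest

-- B's single for loop as a fold over (result so far, last_speaker)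
def pvStepB (st : List (List (String × String)) × Option String) (w : List (String × String)) :
    List (List (String × String)) × Option String :=
  match pvGetSpk w with
  | some v => (st.1 ++ [w], some v)
  | none =>
    match st.2 with
    | some s => (st.1 ++ [w ++ [("speaker", s)]], some s)
    | none => (st.1 ++ [w], none)

def assign_speaker_alt (words : List (List (String × String))) : List (List (String × String)) :=
  (words.foldl pvStepB ([], pvFirstSpk words)).1

-- ===== PRECONDITION & SPEC =====
def Spec_assign_speaker (words : List (List (String × String))) (out : List (List (String × String))) : Prop := out = assign_speaker_alt words
instance (words : List (List (String × String))) (out : List (List (String × String))) : Decidable (Spec_assign_speaker words out) := by unfold Spec_assign_speaker; infer_instance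

-- ===== CLAIM (what is proved, stated in full; the proofs are below) =====
def Claim_equal_assign_speaker : Prop := ∀ (words : List (List (String × String))), Dom_assign_speaker words → Spec_assign_speaker words (assign_speaker words)

-- ===== LEMMAS AND PROOFS =====

-- last_speaker after a pass over l, starting from ls
def pvState (ls : Option String) : List (List (String × String)) → Option String
  | [] => ls
  | w :: r =>
    pvState (match pvGetSpk w with | some v => some v | none => ls) r

theorem foldB_eq (l : List (List (String × String))) :
    ∀ (acc : List (List (String × String))) (ls : Option String),
      (l.foldl pvStepB (acc, ls)).1 = acc ++ pvPassA ls l := by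
  induction l with
  | nil => intro acc ls; simp [pvPassA]
  | cons w rest ih =>
    intro acc ls
    cases h : pvGetSpk w with
    | some v => simp [pvStepB, h, ih, pvPassA]
    | none =>
      cases ls with
      | some s => simp [pvStepB, h, ih, pvPassA]
      | none => simp [pvStepB, h, ih, pvPassA]

theorem passA_append (xs ys : List (List (String × String))) :
    ∀ ls, pvPassA ls (xs ++ ys) = pvPassA ls xs ++ pvPassA (pvState ls xs) ys := by
  induction xs with
  | nil => intro ls; simp [pvPassA, pvState]
  | cons w r ih =>
    intro ls
    cases h : pvGetSpk w with
    | some v => simp [pvPassA, pvState, h, ih]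
    | none =>
      cases ls with
      | some s => simp [pvPassA, pvState, h, ih]
      | none => simp [pvPassA, pvState, h, ih]

theorem state_noSpk (p : List (List (String × String))) (hp : ∀ w ∈ p, pvGetSpk w = none) :
    ∀ ls, pvState ls p = ls := by
  induction p with
  | nil => intro ls; simp [pvState]
  | cons w r ih =>
    intro ls
    have hw := hp w (by simp)
    simp [pvState, hw]
    exact ih (fun x hx => hp x (by simp [hx])) ls

theorem passA_none_noSpk (p : List (List (String × String))) (hp : ∀ w ∈ p, pvGetSpk w = none) :
    pvPassA none p = p := by
  induction p with
  | nil => simp [pvPassA]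
  | cons w r ih =>
    have hw := hp w (by simp)
    simp [pvPassA, hw]
    exact ih (fun x hx => hp x (by simp [hx]))

theorem passA_some_noSpk (p : List (List (String × String))) (s : String)
    (hp : ∀ w ∈ p, pvGetSpk w = none) :
    pvPassA (some s) p = p.map (fun w => w ++ [("speaker", s)]) := by
  induction p with
  | nil => simp [pvPassA]
  | cons w r ih =>
    have hw := hp w (by simp)
    simp [pvPassA, hw]
    exact ih (fun x hx => hp x (by simp [hx]))

theorem getSpk_append_self (w : List (String × String)) (s : String)
    (hw : pvGetSpk w = none) :
    pvGetSpk (w ++ [("speaker", s)]) = some s := by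
  induction w with
  | nil => simp [pvGetSpk]
  | cons kv r ih =>
    obtain ⟨k, v⟩ := kv
    by_cases hk : k == "speaker"
    · simp [pvGetSpk, hk] at hw
    · simp [pvGetSpk, hk] at hw ⊢
      exact ih hw

theorem allSpk_passA_some (l : List (List (String × String))) :
    ∀ (s : String) (w : List (String × String)),
      w ∈ pvPassA (some s) l → (pvGetSpk w).isSome := by
  induction l with
  | nil => intro s w hw; simp [pvPassA] at hw
  | cons x r ih =>
    intro s w hw
    cases hx : pvGetSpk x with
    | some v =>
      simp [pvPassA, hx] at hw
      rcases hw with hw | hw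
      · simp [hw, hx]
      · exact ih v w hw
    | none =>
      simp [pvPassA, hx] at hw
      rcases hw with hw | hw
      · simp [hw, getSpk_append_self x s hx]
      · exact ih s w hw

theorem passA_allSpk (l : List (List (String × String)))
    (hl : ∀ w ∈ l, (pvGetSpk w).isSome) : ∀ ls, pvPassA ls l = l := by
  induction l with
  | nil => intro ls; simp [pvPassA]
  | cons w r ih =>
    intro ls
    have hw := hl w (by simp)
    cases hx : pvGetSpk w with
    | none => simp [hx] at hw
    | some v =>
      simp [pvPassA, hx]
      exact ih (fun x hx' => hl x (by simp [hx'])) (some v)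

theorem firstSpk_none (l : List (List (String × String))) (h : pvFirstSpk l = none) :
    ∀ w ∈ l, pvGetSpk w = none := by
  induction l with
  | nil => intro w hw; simp at hw
  | cons x r ih =>
    intro w hw
    cases hx : pvGetSpk x with
    | some v => simp [pvFirstSpk, hx] at h
    | none =>
      simp [pvFirstSpk, hx] at h
      rcases (by simpa using hw) with hw | hw
      · simpa [hw] using hx
      · exact ih h w hw

theorem firstSpk_some (l : List (List (String × String))) (s : String)
    (h : pvFirstSpk l = some s) :
    ∃ p h0 t, l = p ++ h0 :: t ∧ (∀ w ∈ p, pvGetSpk w = none) ∧ pvGetSpk h0 = some s := by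
  induction l with
  | nil => simp [pvFirstSpk] at h
  | cons x r ih =>
    cases hx : pvGetSpk x with
    | some v =>
      simp [pvFirstSpk, hx] at h
      exact ⟨[], x, r, by simp, by simp, by simp [hx, h]⟩
    | none =>
      simp [pvFirstSpk, hx] at h
      obtain ⟨p, h0, t, hl, hp, hh⟩ := ih h
      refine ⟨x :: p, h0, t, by simp [hl], ?_, hh⟩
      intro w hw
      rcases (by simpa using hw) with hw | hw
      · simpa [hw] using hx
      · exact hp w hw

-- ===== VERDICT (by name: the statement is the Claim_ definition above) =====
theorem assign_speaker_spec : Claim_equal_assign_speaker := by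
  intro words _
  unfold Spec_assign_speaker assign_speaker assign_speaker_alt
  rw [foldB_eq]
  simp only [List.nil_append]
  cases hf : pvFirstSpk words with
  | none =>
    have hns := firstSpk_none words hf
    rw [passA_none_noSpk words hns,
        passA_none_noSpk words.reverse (fun w hw => hns w (List.mem_reverse.mp hw)),
        List.reverse_reverse]
  | some s0 =>
    obtain ⟨p, h0, t, hl, hp, hh⟩ := firstSpk_some words s0 hf
    subst hl
    have hpr : ∀ w ∈ p.reverse, pvGetSpk w = none :=
      fun w hw => hp w (List.mem_reverse.mp hw)
    -- A's first pass
    rw [passA_append p (h0 :: t) none, passA_none_noSpk p hp, state_noSpk p hp]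
    have hfirst : pvPassA none (h0 :: t) = h0 :: pvPassA (some s0) t := by
      simp [pvPassA, hh]
    rw [hfirst]
    -- all words after the first pass' suffix carry a speaker
    have hq : ∀ w ∈ h0 :: pvPassA (some s0) t, (pvGetSpk w).isSome := by
      intro w hw
      rcases (by simpa using hw) with hw | hw
      · simp [hw, hh]
      · exact allSpk_passA_some t s0 w hw
    -- A's second pass, over the reversed list
    rw [List.reverse_append]
    have hrevq : (h0 :: pvPassA (some s0) t).reverse = (pvPassA (some s0) t).reverse ++ [h0] := by
      simp
    rw [hrevq, List.append_assoc,
        passA_append ((pvPassA (some s0) t).reverse) ([h0] ++ p.reverse) none,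
        passA_allSpk ((pvPassA (some s0) t).reverse)
          (fun w hw => hq w (by simpa using Or.inr (List.mem_reverse.mp hw))) none,
        passA_append [h0] p.reverse]
    have hh0pass : ∀ ls, pvPassA ls [h0] = [h0] := by
      intro ls; simp [pvPassA, hh]
    have hsth0 : ∀ ls, pvState ls [h0] = some s0 := by
      intro ls; simp [pvState, hh]
    rw [hh0pass, hsth0, passA_some_noSpk p.reverse s0 hpr]
    -- B's single pass
    rw [passA_append p (h0 :: t) (some s0), passA_some_noSpk p s0 hp, state_noSpk p hp]
    have hfirstB : pvPassA (some s0) (h0 :: t) = h0 :: pvPassA (some s0) t := by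
      simp [pvPassA, hh]
    rw [hfirstB]
    simp
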